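-- pv_equiv track=rewrite | github.com/sueszli/vector-database-benchmark | dataset/python-mutated/_trigonometric_special.py | fermat_coords
-- ===== SOURCE A (Python) =====
-- def fermat_coords(n: int) -> list[int] | None:
--     if False:
--         while True:
--             i = 10
--     'If n can be factored in terms of Fermat primes with\n    multiplicity of each being 1, return those primes, else\n    None\n    '
--     primes = []
--     for p in [3, 5, 17, 257, 65537]:
--         (quotient, remainder) = divmod(n, p)
--         if remainder == 0:
--             n = quotient
--             primes.append(p)
--             if n == 1:
--                 return primes
--     return None
-- ===== SOURCE B (Python) =====
-- def fermat_coords(n: int) -> list[int] | None: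
--     # Exhaustive search: enumerate every nonempty subset of the Fermat
--     # primes by bitmask and return the subset whose product equals n.
--     for mask in range(1, 32):
--         prod, subset, m = 1, [], mask
--         for p in [3, 5, 17, 257, 65537]:
--             if m % 2 == 1:
--                 prod *= p
--                 subset.append(p)
--             m //= 2
--         if prod == n:
--             return subset
--     return None
-- ===== Notes on version B (the rewrite author's own statement) =====
-- stated objective: alternative
-- what changed: B exhaustively enumerates every nonempty subset of the five Fermat primes by bitmask and returns the subset whose product equals n, instead of A's trial division with progressive quotient reduction.
import Mathlib
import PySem

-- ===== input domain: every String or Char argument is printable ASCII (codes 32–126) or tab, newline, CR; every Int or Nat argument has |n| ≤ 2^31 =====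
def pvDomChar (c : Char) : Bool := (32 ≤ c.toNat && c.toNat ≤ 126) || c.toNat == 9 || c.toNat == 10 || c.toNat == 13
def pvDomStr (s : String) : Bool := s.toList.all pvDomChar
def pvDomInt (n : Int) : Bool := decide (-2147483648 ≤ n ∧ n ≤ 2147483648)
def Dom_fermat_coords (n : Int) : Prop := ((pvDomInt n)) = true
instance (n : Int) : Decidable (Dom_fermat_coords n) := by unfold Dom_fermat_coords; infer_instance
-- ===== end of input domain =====

-- B enumerates every nonempty subset of the five Fermat primes by bitmask and
-- returns the subset whose product is n, instead of A's trial-division reduction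
-- (objective: alternative).

-- ===== PORT A =====
-- the for-loop over [3,5,17,257,65537] with mutable n, primes and an early return
def fermatLoop (n : Int) (primes : List Int) : List Int → Option (List Int)
  | [] => none
  | p :: ps =>
    let quotient := PySem.Int.floordiv n p
    let remainder := PySem.Int.mod n p
    if remainder = 0 then
      let primes' := primes ++ [p]
      if quotient = 1 then some primes'
      else fermatLoop quotient primes' ps
    else fermatLoop n primes ps

def fermat_coords (n : Int) : Option (List Int) :=
  fermatLoop n [] [3, 5, 17, 257, 65537]

-- ===== PORT B =====
-- inner for-loop of Source B: decode mask into (prod, subset), peeling bits with % and //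
def decodeMask (mask : Int) : Int × List Int :=
  let st := ([3, 5, 17, 257, 65537] : List Int).foldl
    (fun (st : Int × List Int × Int) p =>
      let prod := st.1
      let subset := st.2.1
      let m := st.2.2
      if PySem.Int.mod m 2 = 1 then (prod * p, subset ++ [p], PySem.Int.floordiv m 2)
      else (prod, subset, PySem.Int.floordiv m 2))
    (1, [], mask)
  (st.1, st.2.1)

-- outer for-loop of Source B over range(1, 32) with early return
def searchMasks (n : Int) : List Int → Option (List Int)
  | [] => none
  | mask :: ms =>
    let d := decodeMask mask
    if d.1 = n then some d.2 else searchMasks n ms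

def fermat_coords_alt (n : Int) : Option (List Int) :=
  searchMasks n (PySem.List.pyRange 1 32 1)

-- ===== PRECONDITION & SPEC =====
def Spec_fermat_coords (n : Int) (out : Option (List Int)) : Prop := out = fermat_coords_alt n
instance (n : Int) (out : Option (List Int)) : Decidable (Spec_fermat_coords n out) := by unfold Spec_fermat_coords; infer_instance

-- ===== CLAIM (what is proved, stated in full; the proofs are below) =====
def Claim_equal_fermat_coords : Prop := ∀ (n : Int), Dom_fermat_coords n → Spec_fermat_coords n (fermat_coords n)

-- ===== LEMMAS AND PROOFS =====

-- the products of all nonempty subsets of the Fermat primes, in mask order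
def fermatProds : List Int :=
  (PySem.List.pyRange 1 32 1).map (fun m => (decodeMask m).1)

-- a coprime element > 1 cannot divide the other element of a coprime pair
lemma not_dvd_of_coprime (p' p : Int) (h1 : 1 < p') (hg : Int.gcd p p' = 1) : ¬ p' ∣ p := by
  intro hd
  have h2 : p'.natAbs ∣ Int.gcd p p' := Nat.dvd_gcd (Int.natAbs_dvd_natAbs.mpr hd) dvd_rfl
  rw [hg, Nat.dvd_one] at h2
  omega

lemma coprime_dvd_iff (p p' q : Int) (hg : Int.gcd p p' = 1) :
    p' ∣ p * q ↔ p' ∣ q := by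
  constructor
  · intro h
    have hc : IsCoprime p' p := by
      rw [Int.isCoprime_iff_gcd_eq_one, Int.gcd_comm]; exact hg
    exact hc.dvd_of_dvd_mul_left h
  · intro h; exact h.mul_left p

-- characterisation of A's loop as filter-and-check (invariant over the prime list)
lemma loop_spec (ps : List Int) (n : Int) (acc : List Int)
    (hpos : ∀ p ∈ ps, 1 < p)
    (hcop : ps.Pairwise (fun a b => Int.gcd a b = 1)) :
    fermatLoop n acc ps =
      (if _ : (ps.filter (fun p => PySem.Int.mod n p == 0)) ≠ []
            ∧ (ps.filter (fun p => PySem.Int.mod n p == 0)).prod = n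
       then some (acc ++ ps.filter (fun p => PySem.Int.mod n p == 0))
       else none) := by
  induction ps generalizing n acc with
  | nil => simp [fermatLoop]
  | cons p ps ih =>
    have hp : 1 < p := hpos p (List.mem_cons_self ..)
    have hpos' : ∀ x ∈ ps, 1 < x := fun x hx => hpos x (List.mem_cons_of_mem _ hx)
    have hcopp : ∀ x ∈ ps, Int.gcd p x = 1 := (List.pairwise_cons.mp hcop).1
    have hcop' : ps.Pairwise (fun a b => Int.gcd a b = 1) := (List.pairwise_cons.mp hcop).2
    by_cases hdvd : p ∣ n
    · obtain ⟨q, hq⟩ := hdvd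
      have hp0 : p ≠ 0 := by omega
      have hmod : PySem.Int.mod n p = 0 := (PySem.Int.mod_eq_zero_iff_dvd n p).mpr ⟨q, hq⟩
      have hquot : PySem.Int.floordiv n p = q := by
        rw [PySem.Int.floordiv_eq_ediv_of_pos (show (0:Int) < p by omega), hq, Int.mul_ediv_cancel_left _ hp0]
      have hfilter_cons :
          (p :: ps).filter (fun x => PySem.Int.mod n x == 0)
            = p :: ps.filter (fun x => PySem.Int.mod n x == 0) := by
        simp [hmod]
      by_cases hq1 : q = 1
      · subst hq1
        have hn : n = p := by omega
        subst hn
        have hfilter_nil : ps.filter (fun x => PySem.Int.mod n x == 0) = [] := by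
          rw [List.filter_eq_nil_iff]
          intro x hx
          simp only [Bool.not_eq_true, beq_eq_false_iff_ne, ne_eq,
            PySem.Int.mod_eq_zero_iff_dvd]
          exact not_dvd_of_coprime x n (hpos' x hx) (hcopp x hx)
        have hL : fermatLoop n acc (n :: ps) = some (acc ++ [n]) := by
          simp [fermatLoop, hmod, hquot]
        rw [hL, hfilter_cons, hfilter_nil, dif_pos ⟨by simp, by simp⟩]
      · have hstep : fermatLoop n acc (p :: ps) = fermatLoop q (acc ++ [p]) ps := by
          simp [fermatLoop, hmod, hquot, hq1]
        have hfilter_eq :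
            ps.filter (fun x => PySem.Int.mod q x == 0)
              = ps.filter (fun x => PySem.Int.mod n x == 0) := by
          apply List.filter_congr
          intro x hx
          have : (x ∣ q) ↔ (x ∣ n) := by
            rw [hq]; exact (coprime_dvd_iff p x q (hcopp x hx)).symm
          simp [PySem.Int.mod_eq_zero_iff_dvd, this]
        rw [hstep, ih q (acc ++ [p]) hpos' hcop', hfilter_eq, hfilter_cons]
        set d := ps.filter (fun x => PySem.Int.mod n x == 0) with hd
        have hcond : (d ≠ [] ∧ d.prod = q) ↔ ((p :: d) ≠ [] ∧ (p :: d).prod = n) := by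
          constructor
          · rintro ⟨h1, h2⟩
            refine ⟨by simp, ?_⟩
            simp [List.prod_cons, h2, hq]
          · rintro ⟨_, h2⟩
            simp only [List.prod_cons, hq] at h2
            have hdq : d.prod = q := mul_left_cancel₀ hp0 h2
            constructor
            · intro hnil
              rw [hnil] at hdq
              simp at hdq
              exact hq1 hdq.symm
            · exact hdq
        by_cases hc : d ≠ [] ∧ d.prod = q
        · rw [dif_pos hc, dif_pos (hcond.mp hc)]
          simp
        · rw [dif_neg hc, dif_neg (fun h => hc (hcond.mpr h))]
    · have hmod : ¬ PySem.Int.mod n p = 0 := fun h =>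
        hdvd ((PySem.Int.mod_eq_zero_iff_dvd n p).mp h)
      have hfilter :
          (p :: ps).filter (fun x => PySem.Int.mod n x == 0)
            = ps.filter (fun x => PySem.Int.mod n x == 0) := by
        simp [hmod]
      rw [show fermatLoop n acc (p :: ps) = fermatLoop n acc ps by simp [fermatLoop, hmod],
          ih n acc hpos' hcop', hfilter]

-- every nonempty sublist of the Fermat-prime list has its product among the mask products
lemma sublist_prod_mem :
    ∀ l ∈ ([3, 5, 17, 257, 65537] : List Int).sublists, l ≠ [] → l.prod ∈ fermatProds := by
  decide

-- B's search returns none when no mask product equals n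
lemma search_none (n : Int) (ms : List Int) (h : ∀ m ∈ ms, (decodeMask m).1 ≠ n) :
    searchMasks n ms = none := by
  induction ms with
  | nil => rfl
  | cons m ms ih =>
    simp only [searchMasks]
    rw [if_neg (h m (List.mem_cons_self ..)), ih (fun x hx => h x (List.mem_cons_of_mem _ hx))]

-- ===== VERDICT (by name: the statement is the Claim_ definition above) =====
theorem fermat_coords_spec : Claim_equal_fermat_coords := by
  intro n _
  unfold Spec_fermat_coords
  by_cases hmem : n ∈ fermatProds
  · -- n is the product of one of the nonempty subsets: both ports are concrete
    fin_cases hmem <;> decide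
  · -- n matches no subset product: both ports return none
    have hB : fermat_coords_alt n = none := by
      unfold fermat_coords_alt
      exact search_none n _ (fun m hm hEq =>
        hmem (hEq ▸ List.mem_map_of_mem (l := PySem.List.pyRange 1 32 1) hm))
    have hA : fermat_coords n = none := by
      unfold fermat_coords
      rw [loop_spec [3, 5, 17, 257, 65537] n [] (by decide) (by decide)]
      rw [dif_neg]
      rintro ⟨hne, hprod⟩
      exact hmem (hprod ▸ sublist_prod_mem _
        (List.mem_sublists.mpr List.filter_sublist) hne)
    rw [hA, hB]
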